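-- pv_equiv track=rewrite | github.com/toncongtrien/PythonBasic | TonCongTrien_12MMC_1813020015/Bai3.py | tinh_tong
-- ===== SOURCE A (Python) =====
-- def tinh_tong(n):
--     tong = 0
--     for i in range (1,n+1):
--         if (i == 13 ):
--             break
--         else:
--             tong += i
--     return tong
-- ===== SOURCE B (Python) =====
-- def tinh_tong(n):
--     m = min(n, 12)
--     return 0 if m < 1 else m * (m + 1) // 2
-- ===== Notes on version B (the rewrite author's own statement) =====
-- stated objective: simpler
-- what changed: Replaces the early-break summation loop with the closed-form triangular number of m = min(n, 12) (0 when m < 1).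
import Mathlib
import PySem

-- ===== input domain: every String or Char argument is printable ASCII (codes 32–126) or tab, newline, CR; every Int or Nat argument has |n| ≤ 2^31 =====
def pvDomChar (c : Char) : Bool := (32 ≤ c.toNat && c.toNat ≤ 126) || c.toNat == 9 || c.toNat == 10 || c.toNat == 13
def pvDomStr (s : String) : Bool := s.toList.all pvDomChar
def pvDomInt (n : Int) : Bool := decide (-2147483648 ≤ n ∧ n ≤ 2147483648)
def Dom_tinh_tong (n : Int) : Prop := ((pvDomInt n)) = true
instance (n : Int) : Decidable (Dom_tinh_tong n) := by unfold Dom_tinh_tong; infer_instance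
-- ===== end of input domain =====

-- B replaces the early-break summation loop with the closed-form triangular number of min(n, 12); objective: simpler.

-- ===== PORT A =====
-- loop state: (tong, broken); 'break' is modelled by the broken flag freezing the state
def pvStepA (s : Int × Bool) (i : Int) : Int × Bool :=
  if s.2 then s else if i = 13 then (s.1, true) else (s.1 + i, s.2)

def tinh_tong (n : Int) : Int :=
  ((PySem.List.pyRange 1 (n + 1) 1).foldl pvStepA (0, false)).1

-- ===== PORT B =====
def tinh_tong_alt (n : Int) : Int :=
  let m := min n 12
  if m < 1 then 0 else PySem.Int.floordiv (m * (m + 1)) 2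

-- ===== PRECONDITION & SPEC =====
def Spec_tinh_tong (n : Int) (out : Int) : Prop := out = tinh_tong_alt n
instance (n : Int) (out : Int) : Decidable (Spec_tinh_tong n out) := by unfold Spec_tinh_tong; infer_instance

-- ===== CLAIM (what is proved, stated in full; the proofs are below) =====
def Claim_equal_tinh_tong : Prop := ∀ (n : Int), Dom_tinh_tong n → Spec_tinh_tong n (tinh_tong n)

-- ===== LEMMAS AND PROOFS =====

-- once broken, the state is frozen
theorem pv_foldl_broken (l : List Int) (t : Int) :
    l.foldl pvStepA (t, true) = (t, true) := by
  induction l with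
  | nil => rfl
  | cons x xs ih => simpa [pvStepA] using ih

-- while 13 has not appeared, the loop just sums
theorem pv_foldl_no13 (l : List Int) (h : (13 : Int) ∉ l) (t : Int) :
    l.foldl pvStepA (t, false) = (t + l.sum, false) := by
  induction l generalizing t with
  | nil => simp
  | cons x xs ih =>
    have hx : x ≠ 13 := fun hx => h (hx ▸ List.mem_cons_self)
    have hxs : (13 : Int) ∉ xs := fun hm => h (List.mem_cons_of_mem _ hm)
    simp only [List.foldl_cons, pvStepA, Bool.false_eq_true, if_false, if_neg hx]
    rw [ih hxs]
    simp [add_assoc]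

-- Gauss: twice the sum of 1..k
theorem pv_tri (k : Nat) :
    (PySem.List.pyRange 1 ((k : Int) + 1) 1).sum * 2 = (k : Int) * ((k : Int) + 1) := by
  induction k with
  | zero => decide
  | succ m ih =>
    have h : PySem.List.pyRange 1 ((m : Int) + 1 + 1) 1
        = PySem.List.pyRange 1 ((m : Int) + 1) 1 ++ [(m : Int) + 1] :=
      PySem.List.pyRange_one_succ_right (by omega)
    push_cast
    rw [h, List.sum_append]
    push_cast at ih
    simp only [List.sum_cons, List.sum_nil]
    nlinarith [ih]

theorem pv_sum_eq_tri (k : Nat) :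
    (PySem.List.pyRange 1 ((k : Int) + 1) 1).sum
      = PySem.Int.floordiv ((k : Int) * ((k : Int) + 1)) 2 := by
  rw [PySem.Int.floordiv_eq_ediv_of_pos (by omega), ← pv_tri k]
  omega

-- ===== VERDICT (by name: the statement is the Claim_ definition above) =====
theorem tinh_tong_spec : Claim_equal_tinh_tong := by
  intro n _
  unfold Spec_tinh_tong tinh_tong tinh_tong_alt
  rcases lt_or_ge n 1 with hlt | hge
  · -- empty range, both 0
    rw [PySem.List.pyRange_one_eq_nil (by omega)]
    simp [min_def]
    omega
  · rcases lt_or_ge n 13 with hsmall | hbig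
    · -- 1 ≤ n ≤ 12 : no break, pure sum
      have h13 : (13 : Int) ∉ PySem.List.pyRange 1 (n + 1) 1 := by
        rw [PySem.List.mem_pyRange_one]; omega
      rw [pv_foldl_no13 _ h13]
      obtain ⟨k, hk⟩ : ∃ k : Nat, n = (k : Int) := ⟨n.toNat, by omega⟩
      subst hk
      rw [zero_add, pv_sum_eq_tri k]
      have hmin : min (k : Int) 12 = (k : Int) := by omega
      rw [hmin, if_neg (by omega)]
    · -- n ≥ 13 : sum 1..12 then break at 13
      have hsplit : PySem.List.pyRange 1 (n + 1) 1
          = PySem.List.pyRange 1 13 1 ++ PySem.List.pyRange 13 (n + 1) 1 :=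
        PySem.List.pyRange_one_append 1 13 (n + 1) (by omega) (by omega)
      have hcons : PySem.List.pyRange 13 (n + 1) 1
          = 13 :: PySem.List.pyRange 14 (n + 1) 1 :=
        PySem.List.pyRange_one_cons (by omega)
      have h78 : (PySem.List.pyRange 1 13 1).foldl pvStepA (0, false) = (78, false) := by
        decide
      rw [hsplit, List.foldl_append, h78, hcons]
      simp only [List.foldl_cons, pvStepA, Bool.false_eq_true, if_false, if_pos trivial]
      rw [pv_foldl_broken]
      have hmin : min n 12 = (12 : Int) := by omega
      rw [hmin]
      decide
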